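-- pv_equiv track=rewrite | github.com/hayaden/optc_python_master | src/cryption.py | find_signature_offsets
-- ===== SOURCE A (Python) =====
-- def find_signature_offsets(data, signature_bytes):
--     """
--     바이너리 안에서 signature_bytes 패턴이 나오는 오프셋 모두 리턴
--     """
--     positions = []
--     i = 0
--     while i <= len(data) - len(signature_bytes):
--         if data[i:i+len(signature_bytes)] == signature_bytes:
--             positions.append(i)
--         i += 1
--     return positions
-- ===== SOURCE B (Python) =====
-- def find_signature_offsets(data, signature_bytes):
--     # Positional filtering: start with every feasible offset and narrow the
--     # candidate set one pattern position at a time (no slice is ever built).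
--     candidates = list(range(len(data) - len(signature_bytes) + 1))
--     for j, c in enumerate(signature_bytes):
--         candidates = [i for i in candidates if data[i + j] == c]
--     return candidates
-- ===== Notes on version B (the rewrite author's own statement) =====
-- stated objective: alternative
-- what changed: Instead of sliding an index and comparing a freshly built slice at every offset, B starts from all feasible offsets and filters the candidate set once per pattern position, never materialising a slice.
import Mathlib
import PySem

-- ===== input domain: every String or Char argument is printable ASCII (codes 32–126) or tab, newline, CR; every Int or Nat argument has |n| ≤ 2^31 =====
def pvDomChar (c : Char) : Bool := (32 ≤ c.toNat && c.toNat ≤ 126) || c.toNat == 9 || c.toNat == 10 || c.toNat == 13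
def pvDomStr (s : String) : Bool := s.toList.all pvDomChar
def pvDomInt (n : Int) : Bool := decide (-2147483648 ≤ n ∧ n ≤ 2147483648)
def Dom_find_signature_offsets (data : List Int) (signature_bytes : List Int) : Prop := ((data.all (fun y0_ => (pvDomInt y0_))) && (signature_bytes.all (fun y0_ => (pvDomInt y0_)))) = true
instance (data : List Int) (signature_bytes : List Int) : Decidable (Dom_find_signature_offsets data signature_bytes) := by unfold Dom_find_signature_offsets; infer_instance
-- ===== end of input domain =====

-- B reorganises the search: instead of comparing a slice at each offset, it filters the set of
-- candidate offsets once per pattern position; same return value everywhere (alternative, not faster).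

-- ===== PORT A =====
-- 'i = 0; while i <= len(data) - len(sig): …; i += 1' is a fold over range(0, len(data)-len(sig)+1)
def find_signature_offsets (data : List Int) (signature_bytes : List Int) : List Int :=
  (PySem.List.pyRange 0 ((data.length : Int) - (signature_bytes.length : Int) + 1) 1).foldl
    (fun positions i =>
      if PySem.List.slice data (some i) (some (i + (signature_bytes.length : Int))) == signature_bytes
      then positions ++ [i] else positions) []

-- ===== PORT B =====
def find_signature_offsets_alt (data : List Int) (signature_bytes : List Int) : List Int :=
  (PySem.List.enumerate signature_bytes 0).foldl
    (fun candidates jc =>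
      candidates.filter (fun i => PySem.List.pyGet? data (i + jc.1) == some jc.2))
    (PySem.List.pyRange 0 ((data.length : Int) - (signature_bytes.length : Int) + 1) 1)

-- ===== PRECONDITION & SPEC =====
def Spec_find_signature_offsets (data : List Int) (signature_bytes : List Int) (out : List Int) : Prop := out = find_signature_offsets_alt data signature_bytes
instance (data : List Int) (signature_bytes : List Int) (out : List Int) : Decidable (Spec_find_signature_offsets data signature_bytes out) := by unfold Spec_find_signature_offsets; infer_instance

-- ===== CLAIM (what is proved, stated in full; the proofs are below) =====
def Claim_equal_find_signature_offsets : Prop := ∀ (data : List Int) (signature_bytes : List Int), Dom_find_signature_offsets data signature_bytes → Spec_find_signature_offsets data signature_bytes (find_signature_offsets data signature_bytes)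

-- ===== LEMMAS AND PROOFS =====

-- B's chain of filters is one filter by the conjunction of all the per-position tests.
theorem foldl_filter_eq_filter_all {α β : Type} (ps : List β) (f : β → α → Bool) (init : List α) :
    ps.foldl (fun cs p => cs.filter (f p)) init
      = init.filter (fun a => ps.all (fun p => f p a)) := by
  induction ps generalizing init with
  | nil => simp
  | cons p ps ih => simp [List.foldl_cons, ih, List.filter_filter, Bool.and_comm]

-- The slice test of A equals B's per-position tests, for 0 ≤ offset in range.
theorem slice_eq_iff_all (signature_bytes data : List Int) (b s : Int)
    (hb : 0 ≤ b + s) :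
    ((PySem.List.slice data (some (b + s)) (some (b + s + (signature_bytes.length : Int))) == signature_bytes)
      = (PySem.List.enumerate signature_bytes s).all
          (fun jc => PySem.List.pyGet? data (b + jc.1) == some jc.2)) := by
  induction signature_bytes generalizing s with
  | nil =>
    rw [PySem.List.slice_toNat data hb (by omega)]
    simp [PySem.List.enumerate]
  | cons c cs ih =>
    rw [PySem.List.slice_toNat data hb (by omega)]
    have htoNat : (b + s + ((c :: cs).length : Int)).toNat - (b + s).toNat = cs.length + 1 := by
      simp only [List.length_cons]; omega
    rw [htoNat, PySem.List.enumerate_cons, List.all_cons]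
    by_cases hlt : (b + s).toNat < data.length
    · rw [List.drop_eq_getElem_cons hlt, List.take_succ_cons,
        PySem.List.pyGet?_eq_some_getElem data hb (by omega)]
      have ihs := ih (s + 1) (by omega)
      rw [PySem.List.slice_toNat data (by omega) (by omega)] at ihs
      have ht1 : (b + (s + 1)).toNat = (b + s).toNat + 1 := by omega
      rw [ht1] at ihs
      have ht2 : (b + (s + 1) + (cs.length : Int)).toNat - ((b + s).toNat + 1) = cs.length := by
        omega
      rw [ht2] at ihs
      simp only [List.cons_beq_cons, ihs, Option.some_beq_some]
    · have hdrop : data.drop (b + s).toNat = [] := by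
        rw [List.drop_eq_nil_iff]; omega
      have hnone : PySem.List.pyGet? data (b + s) = none := by
        rw [PySem.List.pyGet?_eq_none_iff]
        intro hr
        rcases hr with ⟨_, h2⟩
        omega
      rw [hdrop, hnone]
      simp

theorem find_signature_offsets_spec : Claim_equal_find_signature_offsets := by
  intro data signature_bytes _
  unfold Spec_find_signature_offsets find_signature_offsets find_signature_offsets_alt
  rw [PySem.List.foldl_append_if_eq_filter, foldl_filter_eq_filter_all, List.nil_append]
  apply List.filter_congr
  intro i hi
  rw [PySem.List.mem_pyRange_one] at hi
  have := slice_eq_iff_all signature_bytes data i 0 (by omega)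
  simpa using this
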